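-- pv_equiv track=rewrite | github.com/vosslab/brickarchitect-label-converter | tests/test_label_counts_v40.py | _summarize_count_diff
-- ===== SOURCE A (Python) =====
-- def _summarize_count_diff(expected: dict, actual: dict) -> str:
-- 	"""
-- 	Build a summary diff string for two dicts of counts.
--
-- 	Args:
-- 		expected: Expected counts.
-- 		actual: Actual counts.
--
-- 	Returns:
-- 		Diff summary string.
-- 	"""
-- 	expected_keys = set(expected.keys())
-- 	actual_keys = set(actual.keys())
-- 	missing = sorted(expected_keys - actual_keys)
-- 	extra = sorted(actual_keys - expected_keys)
-- 	changed = []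
-- 	for key in sorted(expected_keys & actual_keys):
-- 		expected_value = expected[key]
-- 		actual_value = actual[key]
-- 		if expected_value != actual_value:
-- 			changed.append(f"{key}: expected {expected_value} got {actual_value}")
-- 	lines = []
-- 	if missing:
-- 		lines.append("Missing entries:")
-- 		for key in missing[:10]:
-- 			lines.append(f"- {key}")
-- 	if extra:
-- 		lines.append("Extra entries:")
-- 		for key in extra[:10]:
-- 			lines.append(f"- {key}")
-- 	if changed:
-- 		lines.append("Changed counts:")
-- 		for line in changed[:10]:
-- 			lines.append(f"- {line}")
-- 	return "\n".join(lines)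
-- ===== SOURCE B (Python) =====
-- def _summarize_count_diff(expected: dict, actual: dict) -> str:
-- 	"""Tag-sort-emit: tag each differing key with its section, sort all tagged
-- 	records in one global sort, then stream the output, emitting a header on
-- 	every section change and capping each section with a running counter."""
-- 	records = []
-- 	for key, value in expected.items():
-- 		if key not in actual:
-- 			records.append(("0", key, key))
-- 		elif actual[key] != value:
-- 			records.append(("2", key, f"{key}: expected {value} got {actual[key]}"))
-- 	for key in actual:
-- 		if key not in expected:
-- 			records.append(("1", key, key))
-- 	records.sort(key=lambda r: r[0] + r[1])
-- 	lines = []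
-- 	prev = ""
-- 	count = 0
-- 	for tag, _, text in records:
-- 		if tag != prev:
-- 			if tag == "0":
-- 				lines.append("Missing entries:")
-- 			elif tag == "1":
-- 				lines.append("Extra entries:")
-- 			else:
-- 				lines.append("Changed counts:")
-- 			prev, count = tag, 0
-- 		if count < 10:
-- 			lines.append(f"- {text}")
-- 		count += 1
-- 	return "\n".join(lines)
-- ===== Notes on version B (the rewrite author's own statement) =====
-- stated objective: alternative
-- what changed: Replaces A's three set-difference/intersection computations each with its own sort and its three section-building blocks by tag-sort-emit: every differing key is tagged with its section while scanning the two dicts, all tagged records are sorted once globally, and the output is produced by a single streaming pass that emits a header on each section change and caps each section with a running counter (no per-section lists at all).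
import Mathlib
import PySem

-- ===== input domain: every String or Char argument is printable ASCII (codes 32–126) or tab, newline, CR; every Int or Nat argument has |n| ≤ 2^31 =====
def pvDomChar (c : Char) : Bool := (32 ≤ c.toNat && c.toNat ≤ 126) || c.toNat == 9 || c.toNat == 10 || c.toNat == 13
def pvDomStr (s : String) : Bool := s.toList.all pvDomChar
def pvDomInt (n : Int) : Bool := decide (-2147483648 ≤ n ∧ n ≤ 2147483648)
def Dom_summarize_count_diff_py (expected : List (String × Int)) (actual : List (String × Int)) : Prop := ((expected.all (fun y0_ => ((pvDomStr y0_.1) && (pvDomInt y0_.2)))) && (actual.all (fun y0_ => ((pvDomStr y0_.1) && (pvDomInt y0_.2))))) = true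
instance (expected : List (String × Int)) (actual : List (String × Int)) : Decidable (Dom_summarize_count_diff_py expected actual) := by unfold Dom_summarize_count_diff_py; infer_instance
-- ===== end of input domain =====

-- B replaces A's per-section set operations and section blocks by tag-sort-emit:
-- tag every differing key with its section, sort all tagged records in one global
-- sort, and stream the output with a header on each section change and a
-- per-section counter (alternative decomposition, same cost).

-- ===== PORT A =====
def summarize_count_diff_py (expected : List (String × Int)) (actual : List (String × Int)) : String :=
  let de := PySem.Dict.ofList expected
  let da := PySem.Dict.ofList actual
  let expected_keys : PySem.Set String := PySem.Set.ofList de.keys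
  let actual_keys : PySem.Set String := PySem.Set.ofList da.keys
  let missing := PySem.List.sorted (PySem.Set.diff expected_keys actual_keys) (fun x => x) false
  let extra := PySem.List.sorted (PySem.Set.diff actual_keys expected_keys) (fun x => x) false
  let changed := (PySem.List.sorted (PySem.Set.inter expected_keys actual_keys) (fun x => x) false).foldl
    (fun acc key =>
      let expected_value := de.getD key 0
      let actual_value := da.getD key 0
      if expected_value ≠ actual_value then
        acc ++ [key ++ ": expected " ++ PySem.Int.toStr expected_value ++ " got " ++ PySem.Int.toStr actual_value]
      else acc) []
  let lines : List String := []
  let lines := if missing ≠ [] then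
      (PySem.List.slice missing none (some 10)).foldl (fun acc key => acc ++ ["- " ++ key]) (lines ++ ["Missing entries:"])
    else lines
  let lines := if extra ≠ [] then
      (PySem.List.slice extra none (some 10)).foldl (fun acc key => acc ++ ["- " ++ key]) (lines ++ ["Extra entries:"])
    else lines
  let lines := if changed ≠ [] then
      (PySem.List.slice changed none (some 10)).foldl (fun acc line => acc ++ ["- " ++ line]) (lines ++ ["Changed counts:"])
    else lines
  PySem.Str.join "\n" lines

-- ===== PORT B =====
-- B-side helper: the chained 'if tag == …' header choice of Source B
def pvHeaderOf (t : String) : String :=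
  if t == "0" then "Missing entries:" else if t == "1" then "Extra entries:" else "Changed counts:"

-- B-side helper: the body of Source B's emission loop (state = (lines, prev, count))
def pvEmitStep (st : List String × String × Int) (r : String × String × String) :
    List String × String × Int :=
  let st := if r.1 ≠ st.2.1 then (st.1 ++ [pvHeaderOf r.1], r.1, (0 : Int)) else st
  let lines := if st.2.2 < 10 then st.1 ++ ["- " ++ r.2.2] else st.1
  (lines, st.2.1, st.2.2 + 1)

def summarize_count_diff_py_alt (expected : List (String × Int)) (actual : List (String × Int)) : String :=
  let de := PySem.Dict.ofList expected
  let da := PySem.Dict.ofList actual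
  let records : List (String × String × String) := de.items.foldl
    (fun acc kv =>
      if !(da.contains kv.1) then acc ++ [("0", kv.1, kv.1)]
      else if da.getD kv.1 0 ≠ kv.2 then
        acc ++ [("2", kv.1, kv.1 ++ ": expected " ++ PySem.Int.toStr kv.2 ++ " got " ++ PySem.Int.toStr (da.getD kv.1 0))]
      else acc) []
  let records := da.keys.foldl
    (fun acc key => if !(de.contains key) then acc ++ [("1", key, key)] else acc) records
  let records := PySem.List.sorted records (fun r => r.1 ++ r.2.1) false
  let st := records.foldl pvEmitStep ([], "", 0)
  PySem.Str.join "\n" st.1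

-- ===== PRECONDITION & SPEC =====
def Spec_summarize_count_diff_py (expected : List (String × Int)) (actual : List (String × Int)) (out : String) : Prop := out = summarize_count_diff_py_alt expected actual
instance (expected : List (String × Int)) (actual : List (String × Int)) (out : String) : Decidable (Spec_summarize_count_diff_py expected actual out) := by unfold Spec_summarize_count_diff_py; infer_instance

-- ===== CLAIM =====
def Claim_equal_summarize_count_diff_py : Prop := ∀ (expected : List (String × Int)) (actual : List (String × Int)), Dom_summarize_count_diff_py expected actual → Spec_summarize_count_diff_py expected actual (summarize_count_diff_py expected actual)

-- ===== LEMMAS AND PROOFS =====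

-- "- " prefix applied to a record's text
def pvF (r : String × String × String) : String := "- " ++ r.2.2

-- ---- string lexicographic order helpers ----
theorem pv_chars_lt_append (p l1 l2 : List Char) (h : l1 < l2) : (p ++ l1) < (p ++ l2) := by
  induction p with
  | nil => exact h
  | cons c cs ih =>
    exact (List.lt_iff_lex_lt _ _).mpr (List.Lex.cons ((List.lt_iff_lex_lt _ _).mp ih))

theorem pv_str_append_lt_left (u : String) {s t : String} (h : s < t) : u ++ s < u ++ t := by
  rw [String.lt_iff_toList_lt] at h ⊢
  simpa [String.toList_append] using pv_chars_lt_append u.toList _ _ h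

theorem pv_chars_lt_head {c d : Char} (h : c < d) (s t : List Char) : (c :: s) < (d :: t) :=
  (List.lt_iff_lex_lt _ _).mpr (List.Lex.rel h)

theorem pv_str_tag_lt (c d : Char) (h : c < d) {u v : String} (hu : u.toList = [c])
    (hv : v.toList = [d]) (s t : String) : u ++ s < v ++ t := by
  rw [String.lt_iff_toList_lt]
  simpa [String.toList_append, hu, hv] using pv_chars_lt_head h s.toList t.toList

theorem pv_pairwise_lt_of_nodup {l : List String} (h1 : l.Pairwise (· ≤ ·)) (h2 : l.Nodup) :
    l.Pairwise (· < ·) :=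
  (h1.and h2).imp (fun h => lt_of_le_of_ne h.1 h.2)

-- ---- generic fold/list helpers ----
theorem pv_if_append2 {c : Prop} [Decidable c] (l a b : List String) :
    (if c then (l ++ a) ++ b else l) = l ++ (if c then a ++ b else []) := by
  split_ifs <;> simp

-- A's changed-loop is a filter-and-map
theorem pv_changed_fold (de da : PySem.Dict String Int) (keys c : List String) :
    keys.foldl
      (fun acc key =>
        if de.getD key 0 ≠ da.getD key 0 then
          acc ++ [key ++ ": expected " ++ PySem.Int.toStr (de.getD key 0) ++ " got " ++ PySem.Int.toStr (da.getD key 0)]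
        else acc) c
    = c ++ (keys.filter (fun k => decide (de.getD k 0 ≠ da.getD k 0))).map
             (fun k => k ++ ": expected " ++ PySem.Int.toStr (de.getD k 0) ++ " got " ++ PySem.Int.toStr (da.getD k 0)) := by
  induction keys generalizing c with
  | nil => simp
  | cons k ks ih =>
    by_cases hv : de.getD k 0 = da.getD k 0 <;>
      (try simp [hv] at ih ⊢) <;> simp [ih]

-- an append-only loop body is a flatMap
theorem pv_foldl_append_cases {α β : Type} (l : List α) (g : α → List β)
    (f : List β → α → List β) (hf : ∀ A x, f A x = A ++ g x) (acc : List β) :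
    l.foldl f acc = acc ++ l.flatMap g := by
  induction l generalizing acc with
  | nil => simp
  | cons x xs ih => rw [List.foldl_cons, hf, ih, List.flatMap_cons, List.append_assoc]

theorem pv_flatMap_congr {α β : Type} (l : List α) (f g : α → List β)
    (h : ∀ x ∈ l, f x = g x) : l.flatMap f = l.flatMap g := by
  induction l with
  | nil => rfl
  | cons x xs ih => simp [h x (by simp), ih (fun y hy => h y (by simp [hy]))]

-- a two-branch classify flatMap is a perm of the two filtered maps
theorem pv_flatMap_perm {α β : Type} (l : List α) (p : α → Bool) (q : α → Prop)
    [DecidablePred q] (f g : α → β) :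
    (l.flatMap (fun x => if p x then [f x] else if q x then [g x] else [])).Perm
      ((l.filter p).map f ++ (l.filter (fun x => !p x && decide (q x))).map g) := by
  induction l with
  | nil => simp
  | cons x xs ih =>
    by_cases hp : p x
    · simpa [hp] using ih.cons (f x)
    · by_cases hq : q x
      · simpa [hp, hq] using (ih.cons (g x)).trans List.perm_middle.symm
      · simpa [hp, hq] using ih

-- ---- emission loop characterisation ----
theorem pv_emit_run (xs : List (String × String × String)) (t : String)
    (h : ∀ r ∈ xs, r.1 = t) (lines : List String) (cnt : Int) (h0 : 0 ≤ cnt) :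
    xs.foldl pvEmitStep (lines, t, cnt)
      = (lines ++ (xs.take (10 - cnt).toNat).map pvF, t, cnt + xs.length) := by
  induction xs generalizing lines cnt with
  | nil => simp
  | cons r rs ih =>
    have ht : r.1 = t := h r (by simp)
    have hrs : ∀ x ∈ rs, x.1 = t := fun x hx => h x (by simp [hx])
    have hstep : pvEmitStep (lines, t, cnt) r
        = (if cnt < 10 then lines ++ ["- " ++ r.2.2] else lines, t, cnt + 1) := by
      simp [pvEmitStep, ht]
    rw [List.foldl_cons, hstep]
    by_cases hc : cnt < 10
    · rw [if_pos hc, ih hrs _ (cnt + 1) (by omega)]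
      have htn : (10 - cnt).toNat = (10 - (cnt + 1)).toNat + 1 := by omega
      rw [htn, List.take_succ_cons, List.map_cons]
      simp only [List.length_cons, Nat.cast_add, Nat.cast_one, Prod.mk.injEq]
      exact ⟨by simp [pvF], trivial, by omega⟩
    · rw [if_neg hc, ih hrs _ (cnt + 1) (by omega)]
      have h1 : (10 - cnt).toNat = 0 := by omega
      have h2 : (10 - (cnt + 1)).toNat = 0 := by omega
      rw [h1, h2]
      simp only [List.take_zero, List.map_nil, List.append_nil, List.length_cons,
        Nat.cast_add, Nat.cast_one, Prod.mk.injEq]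
      exact ⟨trivial, trivial, by omega⟩

theorem pv_emit_block (xs : List (String × String × String)) (t : String)
    (h : ∀ r ∈ xs, r.1 = t) (prev : String) (hne : t ≠ prev) (lines : List String) (cnt : Int)
    (hxs : xs ≠ []) :
    xs.foldl pvEmitStep (lines, prev, cnt)
      = (lines ++ pvHeaderOf t :: (xs.take 10).map pvF, t, (xs.length : Int)) := by
  cases xs with
  | nil => exact absurd rfl hxs
  | cons r rs =>
    have ht : r.1 = t := h r (by simp)
    have hrs : ∀ x ∈ rs, x.1 = t := fun x hx => h x (by simp [hx])
    have hstep : pvEmitStep (lines, prev, cnt) r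
        = (lines ++ [pvHeaderOf t, "- " ++ r.2.2], t, 1) := by
      simp [pvEmitStep, ht, hne]
    rw [List.foldl_cons, hstep, pv_emit_run rs t hrs _ 1 (by norm_num)]
    have h9 : ((10 : Int) - 1).toNat = 9 := by decide
    have h10 : (r :: rs).take 10 = r :: rs.take 9 := rfl
    rw [h9, h10, List.map_cons]
    simp only [List.length_cons, Nat.cast_add, Nat.cast_one, Prod.mk.injEq]
    exact ⟨by simp [pvF], trivial, by omega⟩

-- the emission loop over three tagged blocks produces the three capped sections
theorem pv_emit_three (M E C : List (String × String × String))
    (hM : ∀ r ∈ M, r.1 = "0") (hE : ∀ r ∈ E, r.1 = "1") (hC : ∀ r ∈ C, r.1 = "2") :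
    ((M ++ E ++ C).foldl pvEmitStep ([], "", 0)).1
      = (if M ≠ [] then "Missing entries:" :: (M.take 10).map pvF else [])
        ++ (if E ≠ [] then "Extra entries:" :: (E.take 10).map pvF else [])
        ++ (if C ≠ [] then "Changed counts:" :: (C.take 10).map pvF else []) := by
  rw [List.append_assoc, List.foldl_append, List.foldl_append]
  by_cases hMe : M = []
  · subst hMe
    by_cases hEe : E = []
    · subst hEe
      by_cases hCe : C = []
      · subst hCe; simp
      · simp only [List.foldl_nil,
          pv_emit_block C "2" hC "" (by decide) [] 0 hCe]
        simp [hCe, pvHeaderOf]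
    · try rw [List.foldl_nil]
      rw [pv_emit_block E "1" hE "" (by decide) [] 0 hEe]
      by_cases hCe : C = []
      · subst hCe; simp [hEe, pvHeaderOf]
      · rw [pv_emit_block C "2" hC "1" (by decide) _ _ hCe]
        simp [hEe, hCe, pvHeaderOf]
  · rw [pv_emit_block M "0" hM "" (by decide) [] 0 hMe]
    by_cases hEe : E = []
    · subst hEe
      try rw [List.foldl_nil]
      by_cases hCe : C = []
      · subst hCe; simp [hMe, pvHeaderOf]
      · rw [pv_emit_block C "2" hC "0" (by decide) _ _ hCe]
        simp [hMe, hCe, pvHeaderOf]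
    · rw [pv_emit_block E "1" hE "0" (by decide) _ _ hEe]
      by_cases hCe : C = []
      · subst hCe; simp [hMe, hEe, pvHeaderOf]
      · rw [pv_emit_block C "2" hC "1" (by decide) _ _ hCe]
        simp [hMe, hEe, hCe, pvHeaderOf]

-- ---- the main equality ----
theorem pv_main (expected actual : List (String × Int)) :
    summarize_count_diff_py expected actual = summarize_count_diff_py_alt expected actual := by
  unfold summarize_count_diff_py summarize_count_diff_py_alt
  dsimp only
  set de := PySem.Dict.ofList expected with hde
  set da := PySem.Dict.ofList actual with hda
  have hK : de.keys.Nodup := PySem.Dict.nodup_keys_ofList expected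
  have hL : da.keys.Nodup := PySem.Dict.nodup_keys_ofList actual
  set eK : PySem.Set String := PySem.Set.ofList de.keys with heK
  set aK : PySem.Set String := PySem.Set.ofList da.keys with haK
  have heKn : eK.Nodup := PySem.Set.nodup_ofList _
  have haKn : aK.Nodup := PySem.Set.nodup_ofList _
  -- names for A's three sorted key lists
  set missing := PySem.List.sorted (PySem.Set.diff eK aK) (fun x => x) false with hmissing
  set extra := PySem.List.sorted (PySem.Set.diff aK eK) (fun x => x) false with hextra
  set inter := PySem.List.sorted (PySem.Set.inter eK aK) (fun x => x) false with hinter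
  -- A's changed list
  rw [pv_changed_fold de da inter []]
  -- A's slices and per-section folds
  have hslice : ∀ xs : List String, PySem.List.slice xs none (some 10) = xs.take 10 := by
    intro xs; simpa using PySem.List.slice_to_natCast xs 10
  simp only [hslice, PySem.List.foldl_append_singleton_eq_map, List.nil_append]
  -- B's records: classify fold = flatMap over the keys
  rw [pv_foldl_append_cases de.items
      (fun kv =>
        if !(da.contains kv.1) then [(("0" : String), kv.1, kv.1)]
        else if da.getD kv.1 0 ≠ kv.2 then
          [(("2" : String), kv.1, kv.1 ++ ": expected " ++ PySem.Int.toStr kv.2 ++ " got " ++ PySem.Int.toStr (da.getD kv.1 0))]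
        else []) _
      (by
        intro A kv
        by_cases h1 : da.contains kv.1
        · by_cases h2 : da.getD kv.1 0 = kv.2 <;> simp [h1, h2]
        · simp [h1]) []]
  rw [PySem.Dict.items_eq_map_keys de hK 0, List.flatMap_map]
  rw [pv_flatMap_congr de.keys _
      (fun k => if !(da.contains k) then [(("0" : String), k, k)]
        else if decide (da.getD k 0 ≠ de.getD k 0) then
          [(("2" : String), k, k ++ ": expected " ++ PySem.Int.toStr (de.getD k 0) ++ " got " ++ PySem.Int.toStr (da.getD k 0))]
        else [])
      (by
        intro k _
        by_cases h1 : da.contains k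
        · by_cases h2 : da.getD k 0 = de.getD k 0 <;> simp [h1, h2]
        · simp [h1])]
  rw [PySem.List.foldl_append_if (fun key => !(de.contains key)) (fun key => (("1" : String), key, key)) da.keys _]
  simp only [List.nil_append]
  -- membership and nodup facts
  have hmemK : ∀ k, de.contains k = true ↔ k ∈ de.keys := fun k => PySem.Dict.contains_iff_mem_keys de k
  have hmemL : ∀ k, da.contains k = true ↔ k ∈ da.keys := fun k => PySem.Dict.contains_iff_mem_keys da k
  have hMnodup : missing.Nodup := by
    rw [hmissing]; exact (PySem.List.sorted_perm _ _ _).symm.nodup (PySem.Set.nodup_diff _ _ heKn)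
  have hEnodup : extra.Nodup := by
    rw [hextra]; exact (PySem.List.sorted_perm _ _ _).symm.nodup (PySem.Set.nodup_diff _ _ haKn)
  have hInodup : inter.Nodup := by
    rw [hinter]; exact (PySem.List.sorted_perm _ _ _).symm.nodup (PySem.Set.nodup_inter _ _ heKn)
  -- the three blocks as permutations of filters of the key lists
  have hMperm : missing.Perm (de.keys.filter (fun k => !(da.contains k))) := by
    refine (List.perm_ext_iff_of_nodup hMnodup (hK.filter _)).mpr ?_
    intro k
    simp [hmissing, PySem.List.mem_sorted, PySem.Set.mem_diff, List.mem_filter,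
      heK, haK, PySem.Set.mem_ofList, ← hmemL]
  have hEperm : extra.Perm (da.keys.filter (fun k => !(de.contains k))) := by
    refine (List.perm_ext_iff_of_nodup hEnodup (hL.filter _)).mpr ?_
    intro k
    simp [hextra, PySem.List.mem_sorted, PySem.Set.mem_diff, List.mem_filter,
      heK, haK, PySem.Set.mem_ofList, ← hmemK]
  have hCperm : (inter.filter (fun k => decide (de.getD k 0 ≠ da.getD k 0))).Perm
      (de.keys.filter (fun k => !(!(da.contains k)) && decide (da.getD k 0 ≠ de.getD k 0))) := by
    refine (List.perm_ext_iff_of_nodup (hInodup.filter _) (hK.filter _)).mpr ?_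
    intro k
    simp only [hinter, List.mem_filter, PySem.List.mem_sorted,
      PySem.Set.mem_inter, heK, haK, PySem.Set.mem_ofList, Bool.not_not,
      Bool.and_eq_true, decide_eq_true_eq]
    constructor
    · rintro ⟨⟨h1, h2⟩, h3⟩
      exact ⟨h1, ⟨(hmemL k).mpr h2, fun h => h3 h.symm⟩⟩
    · rintro ⟨h1, h2, h3⟩
      exact ⟨⟨h1, (hmemL k).mp h2⟩, fun h => h3 h.symm⟩
  -- B's records are a permutation of the three sorted blocks
  have hrecperm : (missing.map (fun k => (("0" : String), k, k))
        ++ extra.map (fun k => (("1" : String), k, k))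
        ++ (inter.filter (fun k => decide (de.getD k 0 ≠ da.getD k 0))).map
            (fun k => (("2" : String), k, k ++ ": expected " ++ PySem.Int.toStr (de.getD k 0) ++ " got " ++ PySem.Int.toStr (da.getD k 0)))).Perm
      ((de.keys.flatMap fun k =>
          if !(da.contains k) then [(("0" : String), k, k)]
          else if decide (da.getD k 0 ≠ de.getD k 0) then
            [(("2" : String), k, k ++ ": expected " ++ PySem.Int.toStr (de.getD k 0) ++ " got " ++ PySem.Int.toStr (da.getD k 0))]
          else [])
        ++ (da.keys.filter (fun key => !(de.contains key))).map (fun key => (("1" : String), key, key))) := by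
    have hflat := pv_flatMap_perm de.keys (fun k => !(da.contains k))
      (fun k => decide (da.getD k 0 ≠ de.getD k 0) = true)
      (fun k => (("0" : String), k, k))
      (fun k => (("2" : String), k, k ++ ": expected " ++ PySem.Int.toStr (de.getD k 0) ++ " got " ++ PySem.Int.toStr (da.getD k 0)))
    have hflat' : ((de.keys.flatMap fun k =>
          if !(da.contains k) then [(("0" : String), k, k)]
          else if decide (da.getD k 0 ≠ de.getD k 0) then
            [(("2" : String), k, k ++ ": expected " ++ PySem.Int.toStr (de.getD k 0) ++ " got " ++ PySem.Int.toStr (da.getD k 0))]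
          else [])).Perm
        ((de.keys.filter (fun k => !(da.contains k))).map (fun k => (("0" : String), k, k))
          ++ (de.keys.filter (fun k => !(!(da.contains k)) && decide (da.getD k 0 ≠ de.getD k 0))).map
              (fun k => (("2" : String), k, k ++ ": expected " ++ PySem.Int.toStr (de.getD k 0) ++ " got " ++ PySem.Int.toStr (da.getD k 0)))) := by
      simpa using hflat
    have h1 := ((hMperm.map (fun k => (("0" : String), k, k))).append
        (hEperm.map (fun k => (("1" : String), k, k)))).append
      (hCperm.map (fun k => (("2" : String), k, k ++ ": expected " ++ PySem.Int.toStr (de.getD k 0) ++ " got " ++ PySem.Int.toStr (da.getD k 0))))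
    refine h1.trans ?_
    rw [List.append_assoc]
    refine ((List.perm_append_comm
      (l₁ := (da.keys.filter (fun k => !(de.contains k))).map (fun k => (("1" : String), k, k)))
      (l₂ := (de.keys.filter (fun k => !(!(da.contains k)) && decide (da.getD k 0 ≠ de.getD k 0))).map
          (fun k => (("2" : String), k, k ++ ": expected " ++ PySem.Int.toStr (de.getD k 0) ++ " got " ++ PySem.Int.toStr (da.getD k 0))))).append_left _).trans ?_
    rw [← List.append_assoc]
    exact hflat'.symm.append_right _
  -- strict sortedness of the three blocks under the tag key
  have hMlt : missing.Pairwise (· < ·) := by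
    rw [hmissing]
    exact pv_pairwise_lt_of_nodup (PySem.List.sorted_pairwise _ _) (by rw [← hmissing]; exact hMnodup)
  have hElt : extra.Pairwise (· < ·) := by
    rw [hextra]
    exact pv_pairwise_lt_of_nodup (PySem.List.sorted_pairwise _ _) (by rw [← hextra]; exact hEnodup)
  have hClt : (inter.filter (fun k => decide (de.getD k 0 ≠ da.getD k 0))).Pairwise (· < ·) := by
    refine List.Pairwise.filter _ ?_
    rw [hinter]
    exact pv_pairwise_lt_of_nodup (PySem.List.sorted_pairwise _ _) (by rw [← hinter]; exact hInodup)
  have hpair : (missing.map (fun k => (("0" : String), k, k))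
        ++ extra.map (fun k => (("1" : String), k, k))
        ++ (inter.filter (fun k => decide (de.getD k 0 ≠ da.getD k 0))).map
            (fun k => (("2" : String), k, k ++ ": expected " ++ PySem.Int.toStr (de.getD k 0) ++ " got " ++ PySem.Int.toStr (da.getD k 0)))).Pairwise
      (fun a b => (a.1 ++ a.2.1 : String) < b.1 ++ b.2.1) := by
    have t0 : ("0" : String).toList = ['0'] := by decide
    have t1 : ("1" : String).toList = ['1'] := by decide
    have t2 : ("2" : String).toList = ['2'] := by decide
    rw [List.pairwise_append, List.pairwise_append]
    refine ⟨⟨?_, ?_, ?_⟩, ?_, ?_⟩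
    · exact List.pairwise_map.mpr (hMlt.imp (fun h => pv_str_append_lt_left "0" h))
    · exact List.pairwise_map.mpr (hElt.imp (fun h => pv_str_append_lt_left "1" h))
    · intro a ha b hb
      obtain ⟨x, -, rfl⟩ := List.mem_map.mp ha
      obtain ⟨y, -, rfl⟩ := List.mem_map.mp hb
      exact pv_str_tag_lt '0' '1' (by decide) t0 t1 _ _
    · exact List.pairwise_map.mpr (hClt.imp (fun h => pv_str_append_lt_left "2" h))
    · intro a ha b hb
      obtain ⟨y, -, rfl⟩ := List.mem_map.mp hb
      rcases List.mem_append.mp ha with ha | ha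
      · obtain ⟨x, -, rfl⟩ := List.mem_map.mp ha
        exact pv_str_tag_lt '0' '2' (by decide) t0 t2 _ _
      · obtain ⟨x, -, rfl⟩ := List.mem_map.mp ha
        exact pv_str_tag_lt '1' '2' (by decide) t1 t2 _ _
  rw [PySem.List.sorted_eq_of_perm_of_pairwise_lt _ _ _ hrecperm hpair]
  -- emit and compare with A's section building
  have hM0 : ∀ r ∈ missing.map (fun k => (("0" : String), k, k)), r.1 = "0" := by
    intro r hr; obtain ⟨x, -, rfl⟩ := List.mem_map.mp hr; rfl
  have hE0 : ∀ r ∈ extra.map (fun k => (("1" : String), k, k)), r.1 = "1" := by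
    intro r hr; obtain ⟨x, -, rfl⟩ := List.mem_map.mp hr; rfl
  have hC0 : ∀ r ∈ (inter.filter (fun k => decide (de.getD k 0 ≠ da.getD k 0))).map
      (fun k => (("2" : String), k, k ++ ": expected " ++ PySem.Int.toStr (de.getD k 0) ++ " got " ++ PySem.Int.toStr (da.getD k 0))), r.1 = "2" := by
    intro r hr; obtain ⟨x, -, rfl⟩ := List.mem_map.mp hr; rfl
  rw [pv_emit_three (missing.map (fun k => (("0" : String), k, k)))
      (extra.map (fun k => (("1" : String), k, k)))
      ((inter.filter (fun k => decide (de.getD k 0 ≠ da.getD k 0))).map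
        (fun k => (("2" : String), k, k ++ ": expected " ++ PySem.Int.toStr (de.getD k 0) ++ " got " ++ PySem.Int.toStr (da.getD k 0))))
      hM0 hE0 hC0]
  rw [pv_if_append2, pv_if_append2]
  have hf0 : (pvF ∘ fun k => (("0" : String), k, k)) = HAppend.hAppend "- " := by
    funext k; rfl
  have hf1 : (pvF ∘ fun k => (("1" : String), k, k)) = HAppend.hAppend "- " := by
    funext k; rfl
  have hf2 : (pvF ∘ fun k => (("2" : String), k, k ++ ": expected " ++ PySem.Int.toStr (de.getD k 0) ++ " got " ++ PySem.Int.toStr (da.getD k 0)))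
      = (fun k => "- " ++ (k ++ ": expected " ++ PySem.Int.toStr (de.getD k 0) ++ " got " ++ PySem.Int.toStr (da.getD k 0))) := by
    funext k; rfl
  have hf3 : (HAppend.hAppend ("- " : String) ∘ fun k => k ++ ": expected " ++ PySem.Int.toStr (de.getD k 0) ++ " got " ++ PySem.Int.toStr (da.getD k 0))
      = (fun k => "- " ++ (k ++ ": expected " ++ PySem.Int.toStr (de.getD k 0) ++ " got " ++ PySem.Int.toStr (da.getD k 0))) := by
    funext k; rfl
  simp only [← List.map_take, List.map_map, hf0, hf1, hf2, hf3, ne_eq,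
    List.map_eq_nil_iff, List.singleton_append]

-- ===== VERDICT =====
theorem summarize_count_diff_py_spec : Claim_equal_summarize_count_diff_py := by
  intro expected actual _
  unfold Spec_summarize_count_diff_py
  exact pv_main expected actual
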